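-- pv_equiv track=rewrite | github.com/jonahjung22/jupyter-ai-personas | jupyter_ai_personas/pocketflow_context_retrieval/nodes/synthesis.py | _determine_synthesis_goals
-- ===== SOURCE A (Python) =====
-- from typing import Dict, Any, List
--
-- def _determine_synthesis_goals(prep_res: Dict[str, Any]) -> List[str]:
--     """Determine synthesis goals based on context."""
--     goals = ["comprehensive_analysis", "actionable_recommendations"]
--
--     user_query = prep_res["user_query"].lower()
--
--     if any(word in user_query for word in ["help", "how to", "explain", "understand"]):
--         goals.append("educational_guidance")
--
--     if any(word in user_query for word in ["improve", "optimize", "better", "enhance"]):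
--         goals.append("optimization_suggestions")
--
--     if any(word in user_query for word in ["example", "show", "demonstrate", "code"]):
--         goals.append("practical_examples")
--
--     if any(word in user_query for word in ["workflow", "process", "steps"]):
--         goals.append("process_guidance")
--
--     return goals
-- ===== SOURCE B (Python) =====
-- # B: instead of one `in`-test per keyword group, scan the query once position by
-- # position, matching a flat keyword->goal table by prefix at each position into a
-- # set of triggered goals, then emit goals in canonical order.
-- _KEYWORD_GOAL = [
--     ("help", "educational_guidance"),
--     ("how to", "educational_guidance"),
--     ("explain", "educational_guidance"),
--     ("understand", "educational_guidance"),
--     ("improve", "optimization_suggestions"),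
--     ("optimize", "optimization_suggestions"),
--     ("better", "optimization_suggestions"),
--     ("enhance", "optimization_suggestions"),
--     ("example", "practical_examples"),
--     ("show", "practical_examples"),
--     ("demonstrate", "practical_examples"),
--     ("code", "practical_examples"),
--     ("workflow", "process_guidance"),
--     ("process", "process_guidance"),
--     ("steps", "process_guidance"),
-- ]
-- _GOAL_ORDER = [
--     "educational_guidance",
--     "optimization_suggestions",
--     "practical_examples",
--     "process_guidance",
-- ]
--
-- def _determine_synthesis_goals(prep_res):
--     """Determine synthesis goals based on context."""
--     user_query = prep_res["user_query"].lower()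
--     triggered = set()
--     for i in range(len(user_query) + 1):
--         for keyword, goal in _KEYWORD_GOAL:
--             if user_query.startswith(keyword, i):
--                 triggered.add(goal)
--     return ["comprehensive_analysis", "actionable_recommendations"] + \
--         [g for g in _GOAL_ORDER if g in triggered]
-- ===== Notes on version B (the rewrite author's own statement) =====
-- stated objective: alternative
-- what changed: Instead of four independent any(word in query) substring tests, B scans the query once position by position, matching a flat keyword-to-goal table by prefix at each position into a set of triggered goals, then emits the goals in canonical order.
import Mathlib
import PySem

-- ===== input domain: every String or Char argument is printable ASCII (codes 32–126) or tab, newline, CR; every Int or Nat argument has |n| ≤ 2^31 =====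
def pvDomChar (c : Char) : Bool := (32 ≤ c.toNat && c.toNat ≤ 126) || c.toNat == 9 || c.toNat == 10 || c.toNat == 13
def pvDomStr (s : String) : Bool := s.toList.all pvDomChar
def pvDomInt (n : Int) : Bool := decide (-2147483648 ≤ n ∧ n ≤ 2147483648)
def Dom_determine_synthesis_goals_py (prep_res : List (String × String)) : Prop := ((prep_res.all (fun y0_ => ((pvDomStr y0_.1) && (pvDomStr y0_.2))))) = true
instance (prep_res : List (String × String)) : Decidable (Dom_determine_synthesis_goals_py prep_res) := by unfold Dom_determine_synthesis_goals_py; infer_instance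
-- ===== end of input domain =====

-- B replaces the four any(word in query) group tests by one positional scan of the query
-- against a flat keyword->goal table, collecting a set of triggered goals (alternative).

-- ===== PORT A =====
-- Literal transliteration: goals starts with the two base entries, then four
-- independent `if any(word in user_query for word in …): goals.append(…)` branches.
def determine_synthesis_goals_py (prep_res : List (String × String)) : List String :=
  let goals : List String := ["comprehensive_analysis", "actionable_recommendations"]
  match (PySem.Dict.mk prep_res).get? "user_query" with
  | none => []  -- KeyError in Python; excluded by Pre_
  | some q =>
    let user_query := PySem.Str.lower q
    let goals := if (["help", "how to", "explain", "understand"].any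
        (fun word => PySem.Str.isIn word user_query)) then goals ++ ["educational_guidance"] else goals
    let goals := if (["improve", "optimize", "better", "enhance"].any
        (fun word => PySem.Str.isIn word user_query)) then goals ++ ["optimization_suggestions"] else goals
    let goals := if (["example", "show", "demonstrate", "code"].any
        (fun word => PySem.Str.isIn word user_query)) then goals ++ ["practical_examples"] else goals
    let goals := if (["workflow", "process", "steps"].any
        (fun word => PySem.Str.isIn word user_query)) then goals ++ ["process_guidance"] else goals
    goals

-- ===== PORT B =====
-- the flat keyword->goal table _KEYWORD_GOAL of Source B
def pvKeywordGoal : List (String × String) :=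
  [ ("help", "educational_guidance"),
    ("how to", "educational_guidance"),
    ("explain", "educational_guidance"),
    ("understand", "educational_guidance"),
    ("improve", "optimization_suggestions"),
    ("optimize", "optimization_suggestions"),
    ("better", "optimization_suggestions"),
    ("enhance", "optimization_suggestions"),
    ("example", "practical_examples"),
    ("show", "practical_examples"),
    ("demonstrate", "practical_examples"),
    ("code", "practical_examples"),
    ("workflow", "process_guidance"),
    ("process", "process_guidance"),
    ("steps", "process_guidance") ]

-- the canonical output order _GOAL_ORDER of Source B
def pvGoalOrder : List String :=
  [ "educational_guidance", "optimization_suggestions", "practical_examples", "process_guidance" ]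

-- Source B: one pass over the positions of user_query; at each position every table keyword is
-- prefix-matched (user_query.startswith(keyword, i), ported by hand as Chars.startswith on
-- the i-dropped character list — exact for 0 ≤ i ≤ len); triggered goals go into a set,
-- and the output lists the canonical goal order filtered by set membership.
def determine_synthesis_goals_py_alt (prep_res : List (String × String)) : List String :=
  match (PySem.Dict.mk prep_res).get? "user_query" with
  | none => []  -- KeyError in Python; excluded by Pre_
  | some q =>
    let uq := (PySem.Str.lower q).toList
    let triggered : PySem.Set String :=
      (List.range (uq.length + 1)).foldl
        (fun acc i => pvKeywordGoal.foldl
          (fun acc2 kg =>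
            if PySem.Chars.startswith (uq.drop i) kg.1.toList then PySem.Set.add acc2 kg.2 else acc2)
          acc)
        PySem.Set.empty
    ["comprehensive_analysis", "actionable_recommendations"] ++
      pvGoalOrder.filter (fun g => PySem.Set.contains triggered g)

-- ===== PRECONDITION & SPEC =====
-- Pre_ excludes only inputs without a "user_query" key, where Python A raises KeyError.
def Pre_determine_synthesis_goals_py (prep_res : List (String × String)) : Prop :=
  "user_query" ∈ prep_res.map Prod.fst
instance (prep_res : List (String × String)) : Decidable (Pre_determine_synthesis_goals_py prep_res) := by unfold Pre_determine_synthesis_goals_py; infer_instance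
def pvWitness_determine_synthesis_goals_py : (List (String × String)) := [("user_query", "help me")]

def Spec_determine_synthesis_goals_py (prep_res : List (String × String)) (out : List String) : Prop := out = determine_synthesis_goals_py_alt prep_res
instance (prep_res : List (String × String)) (out : List String) : Decidable (Spec_determine_synthesis_goals_py prep_res out) := by unfold Spec_determine_synthesis_goals_py; infer_instance

-- ===== CLAIM (what is proved, stated in full; the proofs are below) =====
def Claim_equal_determine_synthesis_goals_py : Prop := ∀ (prep_res : List (String × String)), Dom_determine_synthesis_goals_py prep_res → Pre_determine_synthesis_goals_py prep_res → Spec_determine_synthesis_goals_py prep_res (determine_synthesis_goals_py prep_res)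

-- ===== LEMMAS AND PROOFS =====

-- membership in the inner (per-position) fold over the keyword table
theorem pv_mem_inner (uq : List Char) (i : Nat) (tbl : List (String × String))
    (acc : PySem.Set String) (g : String) :
    (g ∈ tbl.foldl (fun acc2 kg =>
        if PySem.Chars.startswith (uq.drop i) kg.1.toList then PySem.Set.add acc2 kg.2 else acc2) acc)
    ↔ g ∈ acc ∨ ∃ kg ∈ tbl, PySem.Chars.startswith (uq.drop i) kg.1.toList = true ∧ kg.2 = g := by
  induction tbl generalizing acc with
  | nil => simp
  | cons kg rest ih =>
    simp only [List.foldl_cons, List.mem_cons]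
    rw [ih]
    by_cases h : PySem.Chars.startswith (uq.drop i) kg.1.toList = true
    · simp [h, PySem.Set.mem_add]; tauto
    · simp only [h, if_neg, Bool.false_eq_true, not_false_eq_true]
      constructor
      · rintro (ha | hex)
        · exact Or.inl ha
        · exact Or.inr ⟨_, Or.inr (by exact hex.choose_spec.1), hex.choose_spec.2⟩
      · rintro (ha | ⟨x, hx | hx, hs, hg⟩)
        · exact Or.inl ha
        · exact absurd (hx ▸ hs) h
        · exact Or.inr ⟨x, hx, hs, hg⟩

-- membership in the outer fold over the positions
theorem pv_mem_outer (uq : List Char) (idxs : List Nat)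
    (acc : PySem.Set String) (g : String) :
    (g ∈ idxs.foldl (fun acc i => pvKeywordGoal.foldl
        (fun acc2 kg =>
          if PySem.Chars.startswith (uq.drop i) kg.1.toList then PySem.Set.add acc2 kg.2 else acc2) acc)
        acc)
    ↔ g ∈ acc ∨ ∃ i ∈ idxs, ∃ kg ∈ pvKeywordGoal,
        PySem.Chars.startswith (uq.drop i) kg.1.toList = true ∧ kg.2 = g := by
  induction idxs generalizing acc with
  | nil => simp
  | cons i rest ih =>
    simp only [List.foldl_cons, List.mem_cons]
    rw [ih, pv_mem_inner]
    constructor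
    · rintro ((ha | hex) | ⟨j, hj, hkg⟩)
      · exact Or.inl ha
      · exact Or.inr ⟨i, Or.inl rfl, hex⟩
      · exact Or.inr ⟨j, Or.inr hj, hkg⟩
    · rintro (ha | ⟨j, (rfl | hj), hkg⟩)
      · exact Or.inl (Or.inl ha)
      · exact Or.inl (Or.inr hkg)
      · exact Or.inr ⟨j, hj, hkg⟩

-- a bounded starting position suffices for a prefix match somewhere in the list
theorem pv_exists_bounded (uq kw : List Char) :
    (∃ i, i ∈ List.range (uq.length + 1) ∧ kw <+: uq.drop i) ↔ (∃ j, kw <+: uq.drop j) := by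
  constructor
  · rintro ⟨i, _, h⟩; exact ⟨i, h⟩
  · rintro ⟨j, h⟩
    by_cases hj : j ≤ uq.length
    · exact ⟨j, List.mem_range.mpr (by omega), h⟩
    · refine ⟨uq.length, List.mem_range.mpr (by omega), ?_⟩
      rw [List.drop_length]
      rwa [List.drop_eq_nil_of_le (by omega)] at h
  
-- the triggered-set membership test of B equals the substring test of A
theorem pv_trigger_iff (uq kw : String) :
    (∃ i ∈ List.range (uq.toList.length + 1),
        PySem.Chars.startswith (uq.toList.drop i) kw.toList = true)
    ↔ PySem.Str.isIn kw uq = true := by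
  have key : (∃ j, kw.toList <+: uq.toList.drop j) ↔ kw.toList <:+: uq.toList := by
    rw [PySem.Chars.exists_prefix_drop_iff_isIn, PySem.Chars.isIn_iff_infix]
  simp only [PySem.Chars.startswith_iff]
  rw [pv_exists_bounded, key, ← PySem.Str.isIn_iff_infix]

-- a present key is found by Dict.get?
theorem pv_get_isSome (l : List (String × String))
    (h : "user_query" ∈ l.map Prod.fst) :
    (PySem.Dict.mk l).get? "user_query" ≠ none := by
  induction l with
  | nil => simp at h
  | cons p rest ih =>
    rw [PySem.Dict.get?_mk_cons]
    by_cases hk : (p.1 == "user_query") = true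
    · simp [hk]
    · simp only [hk, Bool.false_eq_true, if_false]
      apply ih
      simp only [List.map_cons, List.mem_cons] at h
      rcases h with h | h
      · exact absurd (by simp [h]) hk
      · exact h

-- A's four if/append branches equal base ++ ordered filter by any triggered set
-- characterized by the flat table
theorem pv_assemble (uq : String) (trig : PySem.Set String)
    (h : ∀ g, PySem.Set.contains trig g = true
        ↔ ∃ kg ∈ pvKeywordGoal, kg.2 = g ∧ PySem.Str.isIn kg.1 uq = true) :
    (let goals : List String := ["comprehensive_analysis", "actionable_recommendations"]
     let goals := if (["help", "how to", "explain", "understand"].any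
        (fun word => PySem.Str.isIn word uq)) then goals ++ ["educational_guidance"] else goals
     let goals := if (["improve", "optimize", "better", "enhance"].any
        (fun word => PySem.Str.isIn word uq)) then goals ++ ["optimization_suggestions"] else goals
     let goals := if (["example", "show", "demonstrate", "code"].any
        (fun word => PySem.Str.isIn word uq)) then goals ++ ["practical_examples"] else goals
     let goals := if (["workflow", "process", "steps"].any
        (fun word => PySem.Str.isIn word uq)) then goals ++ ["process_guidance"] else goals
     goals)
    = ["comprehensive_analysis", "actionable_recommendations"] ++
        pvGoalOrder.filter (fun g => PySem.Set.contains trig g) := by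
  have e1 : PySem.Set.contains trig "educational_guidance" =
      (["help", "how to", "explain", "understand"].any (fun word => PySem.Str.isIn word uq)) := by
    rw [Bool.eq_iff_iff, h]; simp [pvKeywordGoal]
  have e2 : PySem.Set.contains trig "optimization_suggestions" =
      (["improve", "optimize", "better", "enhance"].any (fun word => PySem.Str.isIn word uq)) := by
    rw [Bool.eq_iff_iff, h]; simp [pvKeywordGoal]
  have e3 : PySem.Set.contains trig "practical_examples" =
      (["example", "show", "demonstrate", "code"].any (fun word => PySem.Str.isIn word uq)) := by
    rw [Bool.eq_iff_iff, h]; simp [pvKeywordGoal]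
  have e4 : PySem.Set.contains trig "process_guidance" =
      (["workflow", "process", "steps"].any (fun word => PySem.Str.isIn word uq)) := by
    rw [Bool.eq_iff_iff, h]; simp [pvKeywordGoal]
  simp only [pvGoalOrder, List.filter, e1, e2, e3, e4]
  cases (["help", "how to", "explain", "understand"].any (fun word => PySem.Str.isIn word uq)) <;>
  cases (["improve", "optimize", "better", "enhance"].any (fun word => PySem.Str.isIn word uq)) <;>
  cases (["example", "show", "demonstrate", "code"].any (fun word => PySem.Str.isIn word uq)) <;>
  cases (["workflow", "process", "steps"].any (fun word => PySem.Str.isIn word uq)) <;> rfl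

-- ===== VERDICT (by name: the statement is the Claim_ definition above) =====
theorem determine_synthesis_goals_py_spec : Claim_equal_determine_synthesis_goals_py := by
  intro prep_res _ hpre
  unfold Spec_determine_synthesis_goals_py
  unfold determine_synthesis_goals_py determine_synthesis_goals_py_alt
  cases hq : (PySem.Dict.mk prep_res).get? "user_query" with
  | none => exact absurd hq (pv_get_isSome prep_res hpre)
  | some q =>
    simp only
    set uq := PySem.Str.lower q with huq
    have hT : ∀ g : String, PySem.Set.contains
        ((List.range (uq.toList.length + 1)).foldl
          (fun acc i => pvKeywordGoal.foldl
            (fun acc2 kg =>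
              if PySem.Chars.startswith (uq.toList.drop i) kg.1.toList then PySem.Set.add acc2 kg.2 else acc2) acc)
          PySem.Set.empty) g = true
        ↔ ∃ kg ∈ pvKeywordGoal, kg.2 = g ∧ PySem.Str.isIn kg.1 uq = true := by
      intro g
      rw [PySem.Set.contains_iff, pv_mem_outer]
      simp only [PySem.Set.empty, List.not_mem_nil, false_or]
      constructor
      · rintro ⟨i, hi, kg, hkg, hs, hg⟩
        exact ⟨kg, hkg, hg, (pv_trigger_iff uq kg.1).mp ⟨i, hi, hs⟩⟩
      · rintro ⟨kg, hkg, hg, hin⟩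
        obtain ⟨i, hi, hs⟩ := (pv_trigger_iff uq kg.1).mpr hin
        exact ⟨i, hi, kg, hkg, hs, hg⟩
    exact pv_assemble uq _ hT
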